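-- pv_equiv track=rewrite | github.com/EsakkiMuthu-dev/quote-image-generator | src/Utils.py | formatTheString
-- ===== SOURCE A (Python) =====
-- def formatTheString(quote: str, author : str) -> str:
--     """Format the string."""
--     word_per_line = 3
--     min_len = 13
--     total_len = len(quote.split(" "))
--
--     if total_len <= min_len:
--         word_per_line = 3
--
--     fresh_sentence = ''
--     for i, lenn in enumerate(quote.split()):
--         if(i % word_per_line == 0 and len(lenn) <= 30):
--             fresh_sentence += '\n'
--
--         fresh_sentence += lenn + ' '
--
--     fresh_sentence += f"\n\n - {author}"
--
--     return [fresh_sentence, total_len]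
-- ===== SOURCE B (Python) =====
-- def formatTheString(quote: str, author: str) -> str:
--     """Format the string."""
--     words = quote.split()
--     parts = []
--     while words:
--         chunk, words = words[:3], words[3:]
--         prefix = '\n' if len(chunk[0]) <= 30 else ''
--         parts.append(prefix + ' '.join(chunk) + ' ')
--     return [''.join(parts) + f"\n\n - {author}", len(quote.split(' '))]
-- ===== Notes on version B (the rewrite author's own statement) =====
-- stated objective: alternative
-- what changed: B groups the split words into chunks of 3 and emits one line fragment per chunk (prefix newline decided by the chunk's first word, words joined with spaces), instead of A's per-word loop testing i % 3 on every word; total_len is computed independently from quote.split(' ').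
import Mathlib
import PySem

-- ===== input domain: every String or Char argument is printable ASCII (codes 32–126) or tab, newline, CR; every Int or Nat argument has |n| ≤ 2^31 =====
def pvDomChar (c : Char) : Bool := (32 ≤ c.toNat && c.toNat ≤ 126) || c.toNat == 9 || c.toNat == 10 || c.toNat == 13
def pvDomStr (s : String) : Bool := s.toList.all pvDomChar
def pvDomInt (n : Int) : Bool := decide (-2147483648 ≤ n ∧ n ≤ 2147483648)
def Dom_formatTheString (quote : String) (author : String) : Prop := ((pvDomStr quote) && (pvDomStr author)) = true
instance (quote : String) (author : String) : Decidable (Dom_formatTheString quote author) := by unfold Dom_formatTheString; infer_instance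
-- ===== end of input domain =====

-- B replaces A's per-word modulo-3 newline loop by a per-chunk grouping pass (words[:3]/words[3:]);
-- same return value everywhere; objective: alternative decomposition (no speed claim).

-- ===== PORT A =====
-- string concatenation is done on List Char (exact; Lean's String.append is opaque to the kernel);
-- quote.split(" ") is PySem.Chars.splitOn on the code points (exact, sep ≠ "")
def formatTheString (quote : String) (author : String) : String × Int :=
  let word_per_line : Int := 3
  let min_len : Int := 13
  let total_len : Int := PySem.List.len (PySem.Chars.splitOn quote.toList " ".toList)
  let word_per_line : Int := if total_len ≤ min_len then 3 else word_per_line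
  let fresh_sentence : List Char :=
    (PySem.List.enumerate (PySem.Str.split₀ quote) 0).foldl
      (fun acc p =>
        (if PySem.Int.mod p.1 word_per_line = 0 ∧ PySem.Str.len p.2 ≤ 30 then acc ++ ['\n'] else acc)
          ++ p.2.toList ++ [' ']) []
  (String.ofList (fresh_sentence ++ "\n\n - ".toList ++ author.toList), total_len)

-- ===== PORT B =====
-- the while loop of Source B: slice off words[:3] / words[3:], append one line fragment per chunk
-- (chunk[0] is ported as chunk.headD "": the loop guard makes chunk nonempty, so Python's chunk[0] never raises)
def pvChunkLoop (words : List String) (parts : List (List Char)) : List (List Char) :=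
  match words with
  | [] => parts
  | w :: ws =>
      let chunk := PySem.List.slice (w :: ws) none (some 3)
      let rest := PySem.List.slice (w :: ws) (some 3) none
      let pre : List Char := if PySem.Str.len (chunk.headD "") ≤ 30 then ['\n'] else []
      pvChunkLoop rest (parts ++ [pre ++ PySem.Chars.join [' '] (chunk.map String.toList) ++ [' ']])
termination_by words.length
decreasing_by
  rw [PySem.List.slice_from (w :: ws) (by norm_num : (0:Int) ≤ 3)]
  simp

def formatTheString_alt (quote : String) (author : String) : String × Int :=
  let words := PySem.Str.split₀ quote
  let parts := pvChunkLoop words []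
  (String.ofList (PySem.Chars.join [] parts ++ "\n\n - ".toList ++ author.toList),
   PySem.List.len (PySem.Chars.splitOn quote.toList " ".toList))

-- ===== PRECONDITION & SPEC =====
def Spec_formatTheString (quote : String) (author : String) (out : String × Int) : Prop := out = formatTheString_alt quote author
instance (quote : String) (author : String) (out : String × Int) : Decidable (Spec_formatTheString quote author out) := by unfold Spec_formatTheString; infer_instance

-- ===== CLAIM (what is proved, stated in full; the proofs are below) =====
def Claim_equal_formatTheString : Prop := ∀ (quote : String) (author : String), Dom_formatTheString quote author → Spec_formatTheString quote author (formatTheString quote author)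

-- ===== LEMMAS AND PROOFS =====

lemma pv_join_nil_cons (a : List Char) (l : List (List Char)) :
    PySem.Chars.join [] (a :: l) = a ++ PySem.Chars.join [] l := by
  cases l with
  | nil => simp [PySem.Chars.join_singleton, PySem.Chars.join_nil]
  | cons b r => simp [PySem.Chars.join_cons_cons]

lemma pv_slice_to3 {α : Type} (xs : List α) : PySem.List.slice xs none (some 3) = xs.take 3 := by
  rw [PySem.List.slice_to xs (by norm_num : (0:Int) ≤ 3), show Int.toNat 3 = 3 from rfl]

lemma pv_slice_from3 {α : Type} (xs : List α) : PySem.List.slice xs (some 3) none = xs.drop 3 := by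
  rw [PySem.List.slice_from xs (by norm_num : (0:Int) ≤ 3), show Int.toNat 3 = 3 from rfl]

lemma pvChunkLoop_parts (n : Nat) : ∀ (ws : List String), ws.length ≤ n →
    ∀ (parts : List (List Char)), pvChunkLoop ws parts = parts ++ pvChunkLoop ws [] := by
  induction n with
  | zero =>
      intro ws h parts
      have : ws = [] := List.length_eq_zero_iff.mp (Nat.le_zero.mp h)
      subst this
      rw [pvChunkLoop.eq_def, pvChunkLoop.eq_def]; simp
  | succ n ih =>
      intro ws h parts
      match ws with
      | [] => rw [pvChunkLoop.eq_def, pvChunkLoop.eq_def]; simp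
      | w :: ws' =>
        rw [pvChunkLoop.eq_def (w :: ws') parts, pvChunkLoop.eq_def (w :: ws') []]
        dsimp only
        rw [pv_slice_from3]
        have hlen : (ws'.drop 2).length ≤ n := by simp at h ⊢; omega
        rw [ih _ (by simpa using hlen), ih _ (by simpa using hlen) ([] ++ _)]
        simp

lemma pv_main (n : Nat) : ∀ (ws : List String), ws.length ≤ n → ∀ (s : Int) (acc : List Char),
    (3 : Int) ∣ s →
    (PySem.List.enumerate ws s).foldl
      (fun acc p =>
        (if PySem.Int.mod p.1 3 = 0 ∧ PySem.Str.len p.2 ≤ 30 then acc ++ ['\n'] else acc)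
          ++ p.2.toList ++ [' ']) acc
      = acc ++ PySem.Chars.join [] (pvChunkLoop ws []) := by
  induction n with
  | zero =>
      intro ws h s acc _
      have : ws = [] := List.length_eq_zero_iff.mp (Nat.le_zero.mp h)
      subst this
      rw [pvChunkLoop.eq_def]
      simp [PySem.List.enumerate_nil, PySem.Chars.join_nil]
  | succ n ih =>
      intro ws h s acc hdvd
      match ws with
      | [] =>
          rw [pvChunkLoop.eq_def]
          simp [PySem.List.enumerate_nil, PySem.Chars.join_nil]
      | w :: ws' =>
        rw [pvChunkLoop.eq_def (w :: ws') [], ]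
        dsimp only
        rw [pv_slice_from3, pv_slice_to3]
        rw [pvChunkLoop_parts n _ (by simp at h ⊢; omega)]
        simp only [List.nil_append, List.singleton_append]
        rw [pv_join_nil_cons]
        have nd1 : ¬ (3:Int) ∣ (s+1) := by omega
        have nd2 : ¬ (3:Int) ∣ (s+1+1) := by omega
        match ws' with
        | [] =>
            rw [pvChunkLoop.eq_def]
            simp [PySem.List.enumerate_cons, PySem.List.enumerate_nil, hdvd,
              PySem.Chars.join_singleton, PySem.Chars.join_nil]
            split <;> simp
        | [b] =>
            rw [pvChunkLoop.eq_def]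
            simp [PySem.List.enumerate_cons, PySem.List.enumerate_nil, hdvd, nd1,
              PySem.Chars.join_cons_cons, PySem.Chars.join_singleton, PySem.Chars.join_nil]
            split <;> simp
        | b :: c :: rest =>
            have hrest : rest.length ≤ n := by simp at h; omega
            have hdvd3 : (3:Int) ∣ (s + 3) := by obtain ⟨k, hk⟩ := hdvd; exact ⟨k+1, by omega⟩
            simp only [PySem.List.enumerate_cons, List.foldl_cons]
            rw [show s + 1 + 1 + 1 = s + 3 by ring]
            rw [ih rest hrest (s+3) _ hdvd3]
            simp only [List.take_succ_cons, List.take_zero, List.drop_succ_cons, List.drop_zero,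
              List.map_cons, List.map_nil, PySem.Chars.join_cons_cons, PySem.Chars.join_singleton]
            simp [hdvd, nd1, nd2]
            split <;> simp

-- ===== VERDICT (by name: the statement is the Claim_ definition above) =====
theorem formatTheString_spec : Claim_equal_formatTheString := by
  intro quote author _
  unfold Spec_formatTheString formatTheString formatTheString_alt
  simp only [ite_self]
  rw [pv_main (PySem.Str.split₀ quote).length (PySem.Str.split₀ quote) le_rfl 0 []
      ⟨0, by ring⟩]
  simp
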